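-- pv_equiv track=rewrite | github.com/mikhail1998/lab3 | lab3.py | delnul
-- ===== SOURCE A (Python) =====
-- def isvector(v):
--     """
--     Вернет 1 если v-вектор строка,
--     в противном случае вернет 0.
--     """
--     try:
--         len(v[0])
--         return 0
--     except TypeError:
--         return 1
--
-- def vol(m,i):
--     """
--     Функция, выделяющая из матрицы m[n*k] i-ый столбец
--     и возвращающая его в виде вектора строки.
--     """
--     if isvector(m):
--         return m
--     else:
--         res=[]
--         n=len(m)
--         for j in range(0,n):
--             res.append(m[j][i])
--         return res
--
-- def nulvector(v):
--     """
--     Тест на нулевой вектор, заданный в виде вектора строки.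
--     Вернет 1 если все элемента вектора нули,
--     0 в противном случае.
--     """
--     l=len(v)
--     c=v.count(0)
--     if l==c:
--         return 1
--     else:
--         return 0
--
-- def delcol(m,i):
--     """
--     Удаление из матрицы m i-ого столбца.
--     Ничего не возвращает, а сразу меняет m.
--     """
--     l=len(m)
--     for j in range(0,l):
--         m[j].pop(i)
--
-- def delnul(m):
--     """
--     Удаление нулевых строк и столбцов матрицы m[l*k],
--     где l-кол-во строк матрицы, а k-кол-во столбцов
--     матрицы. Возвращает матрицу с удаленными нулевыми векторами,
--     но не изменяет исходную матрицу.
--     """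
--     res=m.copy()
--     l=len(res)
--     k=len(res[0])
--     i=0
--     j=0
--     count=[]
--     while i<l:
--         if nulvector(res[i]):
--             res.pop(i)
--             l=l-1
--             continue
--         if i==0:
--             while j<k:
--                 if nulvector(vol(res,j)):
--                     delcol(res,j)
--                     k=k-1
--                     continue
--                 j=j+1
--         i=i+1
--     return res
-- ===== SOURCE B (Python) =====
-- def delnul(m):
--     """Remove all-zero rows and columns. One pass to select the non-zero rows,
--     one pass over column indices to select the non-zero columns, then build
--     the filtered matrix; does not mutate m (A mutates m's rows in place)."""
--     rows = [r for r in m if any(x != 0 for x in r)]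
--     if not rows:
--         return []
--     keep = [j for j in range(len(rows[0])) if any(r[j] != 0 for r in rows)]
--     return [[r[j] for j in keep] for r in rows]
-- ===== Notes on version B (the rewrite author's own statement) =====
-- stated objective: faster
-- what changed: A repeatedly re-scans and destructively pops zero rows/columns with index bookkeeping (rebuilding each column via vol on every test and mutating every row with pop); B filters the non-zero rows once, computes the set of non-zero column indices once, and builds the result matrix in a single comprehension without mutating the input. Pre_ excludes the empty matrix (A raises IndexError) and ragged matrices with a non-zero row, on which A either raises IndexError or accidentally returns rows truncated/extended by the first row's length.
-- outside the precondition, e.g. on delnul([[1], [2, 3]]): A returns [[1], [2, 3]], B returns [[1], [2]]; on delnul([[0, 1], [0, 2, 5]]): A returns [[1], [2, 5]], B returns [[1], [2]]; on delnul([[0, 2], [3]]): A raises IndexError, B raises IndexError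
import Mathlib
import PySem

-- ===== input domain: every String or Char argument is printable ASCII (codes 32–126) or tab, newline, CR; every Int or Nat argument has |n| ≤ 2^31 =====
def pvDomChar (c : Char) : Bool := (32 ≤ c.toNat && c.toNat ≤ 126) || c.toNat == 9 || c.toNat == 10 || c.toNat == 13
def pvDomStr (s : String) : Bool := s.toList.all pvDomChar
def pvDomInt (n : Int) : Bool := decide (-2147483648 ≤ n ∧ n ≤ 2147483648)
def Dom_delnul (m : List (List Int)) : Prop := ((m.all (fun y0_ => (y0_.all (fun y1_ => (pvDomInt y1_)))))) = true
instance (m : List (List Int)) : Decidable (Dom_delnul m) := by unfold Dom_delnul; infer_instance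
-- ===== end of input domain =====

-- B replaces A's destructive pop-and-rescan deletion of zero rows/columns by one filtering
-- pass over rows and one over column indices (A also mutates m's rows in place; B does not —
-- the equivalence proved here is about the return value only).


-- ===== PORT A =====
-- nulvector(v): 1 iff all entries are 0 (len(v) == v.count(0))
def nulvectorL (v : List Int) : Int :=
  let l : Int := v.length
  let c : Int := PySem.List.count v 0
  if l = c then 1 else 0

-- vol(m, i): column i as a row vector.  isvector(m) is always 0 here (m's elements are
-- lists, so len(v[0]) does not raise TypeError), so only the else-branch is ported:
-- the loop 'for j in range(0,n): res.append(m[j][i])'.  Out-of-range m[j][i] raises in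
-- Python (excluded by Pre_); the port defaults to 0 there, exact inside Pre_.
def volL (m : List (List Int)) (i : Int) : List Int :=
  (PySem.List.pyRange 0 (m.length : Int) 1).foldl
    (fun res j => res ++ [((PySem.List.pyGet? ((PySem.List.pyGet? m j).getD []) i).getD 0)]) []

-- delcol(m, i): 'for j in range(0,l): m[j].pop(i)' — each row independently loses index i.
-- pop out of range raises in Python (excluded by Pre_); the port keeps the row, exact inside Pre_.
def delcolL (m : List (List Int)) (i : Int) : List (List Int) :=
  m.map (fun r => match PySem.List.pop? r i with | some p => p.2 | none => r)

-- termination measures for the two while-loops (cited by name in decreasing_by)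
theorem pvDecPop {l i : Int} (h : i < l) : (l - 1 - i).toNat < (l - i).toNat := by omega
theorem pvDecStep {l i : Int} (h : i < l) : (l - (i + 1)).toNat < (l - i).toNat := by omega

-- the inner 'while j<k' column loop of delnul
def innerL (res : List (List Int)) (k j : Int) : List (List Int) × Int × Int :=
  if h : j < k then
    if nulvectorL (volL res j) = 1 then
      innerL (delcolL res j) (k - 1) j
    else
      innerL res k (j + 1)
  else (res, k, j)
termination_by (k - j).toNat
decreasing_by
  · exact pvDecPop h
  · exact pvDecStep h

-- the outer 'while i<l' row loop of delnul (res.pop(i) raises out of range in Python;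
-- excluded by Pre_, the port keeps res there)
def outerL (res : List (List Int)) (l k i j : Int) : List (List Int) :=
  if h : i < l then
    if nulvectorL ((PySem.List.pyGet? res i).getD []) = 1 then
      outerL (match PySem.List.pop? res i with | some p => p.2 | none => res) (l - 1) k i j
    else if i = 0 then
      let t := innerL res k j
      outerL t.1 l t.2.1 (i + 1) t.2.2
    else
      outerL res l k (i + 1) j
  else res
termination_by (l - i).toNat
decreasing_by
  · exact pvDecPop h
  · exact pvDecStep h
  · exact pvDecStep h

def delnul (m : List (List Int)) : List (List Int) :=
  -- res = m.copy(); l = len(res); k = len(res[0])  (res[0] raises on empty m: Pre_)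
  outerL m (m.length : Int) (((PySem.List.pyGet? m 0).getD []).length : Int) 0 0

-- ===== PORT B =====
def delnul_alt (m : List (List Int)) : List (List Int) :=
  let rows := m.filter (fun r => r.any (fun x => x != 0))
  if rows = [] then []
  else
    let keep := (PySem.List.pyRange 0 ((((PySem.List.pyGet? rows 0).getD []).length : Nat) : Int) 1).filter
      (fun j => rows.any (fun r => (PySem.List.pyGet? r j).getD 0 != 0))
    rows.map (fun r => keep.map (fun j => (PySem.List.pyGet? r j).getD 0))

-- ===== PRECONDITION & SPEC =====
-- Pre_ excludes the empty matrix (A raises IndexError on res[0]) and ragged matrices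
-- having a non-zero row, on which A either raises IndexError or accidentally returns rows
-- truncated/extended by the first row's length; all-zero matrices may be ragged (A pops
-- every row before ever reading a column).
def Pre_delnul (m : List (List Int)) : Prop :=
  m ≠ [] ∧ ((∀ r ∈ m, ∀ x ∈ r, x = 0) ∨ (∀ r ∈ m, r.length = (m.headD []).length))
instance (m : List (List Int)) : Decidable (Pre_delnul m) := by unfold Pre_delnul; infer_instance

def pvWitness_delnul : List (List Int) := [[0, 1], [0, 0], [2, 3]]

def Spec_delnul (m : List (List Int)) (out : List (List Int)) : Prop := out = delnul_alt m
instance (m : List (List Int)) (out : List (List Int)) : Decidable (Spec_delnul m out) := by unfold Spec_delnul; infer_instance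

-- ===== CLAIM (what is proved, stated in full; the proofs are below) =====
def Claim_equal_delnul : Prop := ∀ (m : List (List Int)), Dom_delnul m → Pre_delnul m → Spec_delnul m (delnul m)

-- ===== LEMMAS AND PROOFS =====

-- `r is a non-zero row` as B's filter tests it
def nzB (r : List Int) : Bool := r.any (fun x => x != 0)

-- pure description of A's inner column loop acting on the part of the rows right of the cursor
def filtCols : Nat → List (List Int) → List (List Int)
  | 0, T => T.map (fun _ => ([] : List Int))
  | w+1, T =>
    if T.all (fun r => r.headD 0 == 0) then filtCols w (T.map List.tail)
    else List.zipWith (fun r rest => r.headD 0 :: rest) T (filtCols w (T.map List.tail))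

-- number of columns the inner loop keeps (the final values of k and j)
def keptW : Nat → List (List Int) → Nat
  | 0, _ => 0
  | w+1, T => if T.all (fun r => r.headD 0 == 0) then keptW w (T.map List.tail)
              else keptW w (T.map List.tail) + 1

-- `column t has a non-zero entry`
def maskF (T : List (List Int)) (t : Nat) : Bool := T.any (fun r => r.getD t 0 != 0)

theorem nulvector_iff (v : List Int) : nulvectorL v = 1 ↔ ∀ x ∈ v, x = 0 := by
  have h1 : ((v.length : Int) = (PySem.List.count v 0 : Int)) ↔ ∀ x ∈ v, x = 0 := by
    rw [PySem.List.count_eq]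
    constructor
    · intro h x hx
      exact (List.count_eq_length.mp (by omega) x hx).symm
    · intro hall
      have := List.count_eq_length.mpr (fun b hb => (hall b hb).symm)
      omega
  show ((if (v.length : Int) = (PySem.List.count v 0 : Int) then (1:Int) else 0) = 1) ↔ ∀ x ∈ v, x = 0
  split_ifs with h
  · exact iff_of_true rfl (h1.mp h)
  · constructor
    · intro h0; norm_num at h0
    · intro hall; exact absurd (h1.mpr hall) h

theorem nzB_eq_false_iff (r : List Int) : nzB r = false ↔ ∀ x ∈ r, x = 0 := by simp [nzB]

theorem nzB_eq_true_iff (r : List Int) : nzB r = true ↔ ∃ x ∈ r, x ≠ 0 := by simp [nzB]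

theorem nulvector_eq_one_eq (v : List Int) : (nulvectorL v = 1) ↔ nzB v = false := by
  rw [nulvector_iff, nzB_eq_false_iff]

theorem mem_zipWith' {α β γ : Type} (f : α → β → γ) :
    ∀ (P : List α) (T : List β) (c : γ), c ∈ List.zipWith f P T → ∃ a ∈ P, ∃ b ∈ T, c = f a b
  | [], _, c, h => by simp at h
  | _ :: _, [], c, h => by simp at h
  | p :: P, t :: T, c, h => by
    rw [List.zipWith_cons_cons, List.mem_cons] at h
    rcases h with h | h
    · exact ⟨p, by simp, t, by simp, h⟩
    · obtain ⟨a, ha, b, hb, rfl⟩ := mem_zipWith' f P T c h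
      exact ⟨a, by simp [ha], b, by simp [hb], rfl⟩

theorem map_range_getD (m : List (List Int)) (g : List Int → Int) :
    (List.range m.length).map (fun k => g (m.getD k [])) = m.map g := by
  apply List.ext_getElem (by simp)
  intro n h1 h2
  simp only [List.getElem_map, List.getElem_range]
  rw [List.getD_eq_getElem m [] (by simpa using h2)]

theorem volL_eq (m : List (List Int)) (i : Int) :
    volL m i = m.map (fun row => (PySem.List.pyGet? row i).getD 0) := by
  unfold volL
  rw [PySem.List.foldl_append_singleton_eq_map
        (f := fun j => ((PySem.List.pyGet? ((PySem.List.pyGet? m j).getD []) i).getD 0))]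
  rw [List.nil_append, PySem.List.pyRange_zero_nat, List.map_map]
  have : ((fun j => ((PySem.List.pyGet? ((PySem.List.pyGet? m j).getD []) i).getD 0)) ∘ (fun k : Nat => (k : Int)))
      = fun k : Nat => ((PySem.List.pyGet? (m.getD k []) i).getD 0) := by
    funext k
    simp [Function.comp, PySem.List.pyGet?_natCast, List.getD_eq_getElem?_getD]
  rw [this]
  exact map_range_getD m (fun row => (PySem.List.pyGet? row i).getD 0)

theorem map_get_pref : ∀ (P T : List (List Int)) (jn : Nat), P.length = T.length →
    (∀ p ∈ P, p.length = jn) → (∀ r ∈ T, r ≠ []) →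
    (List.zipWith (· ++ ·) P T).map (fun row => (PySem.List.pyGet? row ((jn : Nat) : Int)).getD 0)
      = T.map (fun r => r.headD 0)
  | [], [], jn, _, _, _ => by simp
  | [], _ :: _, jn, h, _, _ => by simp at h
  | _ :: _, [], jn, h, _, _ => by simp at h
  | p :: P, t :: T, jn, hl, hP, hT => by
    rw [List.zipWith_cons_cons, List.map_cons, List.map_cons]
    have hp : p.length = jn := hP p (by simp)
    cases t with
    | nil => exact absurd rfl (hT [] (by simp))
    | cons y ys =>
      congr 1
      · rw [← hp, PySem.List.pyGet?_append_length]; rfl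
      · exact map_get_pref P T jn (by simpa using hl) (fun q hq => hP q (by simp [hq]))
          (fun r hr => hT r (by simp [hr]))

theorem eraseIdx_append_self {α : Type} : ∀ (p t : List α), (p ++ t).eraseIdx p.length = p ++ t.tail
  | [], t => by simp [List.eraseIdx_zero]
  | a :: p, t => by
    simp only [List.cons_append, List.length_cons, List.eraseIdx_cons_succ]
    rw [eraseIdx_append_self p t]

theorem delcol_pref : ∀ (P T : List (List Int)) (jn : Nat), P.length = T.length →
    (∀ p ∈ P, p.length = jn) → (∀ r ∈ T, r ≠ []) →
    delcolL (List.zipWith (· ++ ·) P T) ((jn : Nat) : Int) = List.zipWith (· ++ ·) P (T.map List.tail)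
  | [], [], jn, _, _, _ => by simp [delcolL]
  | [], _ :: _, jn, h, _, _ => by simp at h
  | _ :: _, [], jn, h, _, _ => by simp at h
  | p :: P, t :: T, jn, hl, hP, hT => by
    unfold delcolL
    rw [List.zipWith_cons_cons, List.map_cons, List.map_cons, List.zipWith_cons_cons]
    have hp : p.length = jn := hP p (by simp)
    have htne : t ≠ [] := hT t (by simp)
    have hlt : p.length < (p ++ t).length := by
      have := List.length_pos_of_ne_nil htne
      simp only [List.length_append]; omega
    congr 1
    · rw [← hp, PySem.List.pop?_natCast _ _ hlt]
      show (p ++ t).eraseIdx p.length = p ++ t.tail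
      exact eraseIdx_append_self p t
    · have := delcol_pref P T jn (by simpa using hl) (fun q hq => hP q (by simp [hq]))
        (fun r hr => hT r (by simp [hr]))
      unfold delcolL at this
      exact this

theorem pref_push : ∀ (P T F : List (List Int)),
    List.zipWith (· ++ ·) (List.zipWith (fun p r => p ++ [r.headD 0]) P T) F
      = List.zipWith (· ++ ·) P (List.zipWith (fun r rest => r.headD 0 :: rest) T F)
  | [], _, _ => by simp
  | _ :: _, [], _ => by simp
  | _ :: _, _ :: _, [] => by simp
  | p :: P, t :: T, f :: F => by
    simp only [List.zipWith_cons_cons]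
    rw [pref_push P T F]
    simp [List.append_assoc]

theorem pref_shift : ∀ (P T : List (List Int)), P.length = T.length → (∀ r ∈ T, r ≠ []) →
    List.zipWith (· ++ ·) (List.zipWith (fun p r => p ++ [r.headD 0]) P T) (T.map List.tail)
      = List.zipWith (· ++ ·) P T
  | [], [], _, _ => by simp
  | [], _ :: _, h, _ => by simp at h
  | _ :: _, [], h, _ => by simp at h
  | p :: P, t :: T, hl, hT => by
    simp only [List.map_cons, List.zipWith_cons_cons]
    rw [pref_shift P T (by simpa using hl) (fun r hr => hT r (by simp [hr]))]
    cases t with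
    | nil => exact absurd rfl (hT [] (by simp))
    | cons y ys => simp

theorem zipWith_nil_pref : ∀ (T F : List (List Int)), F.length ≤ T.length →
    List.zipWith (· ++ ·) (T.map (fun _ => ([] : List Int))) F = F
  | _, [], _ => by simp
  | [], _ :: _, h => by simp at h
  | t :: T, f :: F, h => by
    simp only [List.map_cons, List.zipWith_cons_cons, List.nil_append]
    rw [zipWith_nil_pref T F (by simpa using h)]

theorem map_const_nil_of : ∀ (T : List (List Int)), (∀ r ∈ T, r = []) →
    T.map (fun _ => ([] : List Int)) = T
  | [], _ => rfl
  | t :: T, h => by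
    rw [List.map_cons, map_const_nil_of T (fun r hr => h r (by simp [hr])), (h t (by simp))]

theorem length_filtCols : ∀ (w : Nat) (T : List (List Int)), (filtCols w T).length = T.length
  | 0, T => by simp [filtCols]
  | w+1, T => by
    unfold filtCols
    split_ifs
    · rw [length_filtCols w]; simp
    · rw [List.length_zipWith, length_filtCols w]; simp

theorem inner_char : ∀ (w : Nat) (P T : List (List Int)) (jn : Nat),
    P.length = T.length → (∀ p ∈ P, p.length = jn) → (∀ r ∈ T, r.length = w) →
    innerL (List.zipWith (· ++ ·) P T) ((jn : Int) + (w : Int)) (jn : Int)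
      = (List.zipWith (· ++ ·) P (filtCols w T), (jn : Int) + (keptW w T : Int), (jn : Int) + (keptW w T : Int))
  | 0, P, T, jn, hl, hP, hT => by
    rw [innerL, dif_neg (by omega)]
    have hT0 : ∀ r ∈ T, r = [] := fun r hr => List.eq_nil_of_length_eq_zero (hT r hr)
    rw [show filtCols 0 T = T from by rw [filtCols]; exact map_const_nil_of T hT0]
    rw [show keptW 0 T = 0 from rfl]
    rw [show ((jn : Int) + ((0 : Nat) : Int)) = (jn : Int) from by push_cast; ring]
  | w+1, P, T, jn, hl, hP, hT => by
    have hTne : ∀ r ∈ T, r ≠ [] := by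
      intro r hr h0
      have := hT r hr
      rw [h0] at this
      simp at this
    have htail : ∀ r ∈ T.map List.tail, r.length = w := by
      intro r hr
      obtain ⟨s, hs, rfl⟩ := List.mem_map.mp hr
      have := hT s hs
      simp [List.length_tail, this]
    rw [innerL, dif_pos (by omega)]
    have hcol : (nulvectorL (volL (List.zipWith (· ++ ·) P T) ((jn : Nat) : Int)) = 1)
        ↔ (T.all (fun r => r.headD 0 == 0) = true) := by
      rw [volL_eq, map_get_pref P T jn hl hP hTne, nulvector_iff]
      simp [List.all_eq_true]
    by_cases hc : T.all (fun r => r.headD 0 == 0) = true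
    · rw [if_pos (hcol.mpr hc)]
      rw [delcol_pref P T jn hl hP hTne]
      rw [show ((jn : Int) + ((w+1 : Nat) : Int)) - 1 = (jn : Int) + (w : Int) by push_cast; ring]
      rw [inner_char w P (T.map List.tail) jn (by simpa using hl) hP htail]
      rw [show filtCols (w+1) T = filtCols w (T.map List.tail) from by
            rw [filtCols]; rw [if_pos hc]]
      rw [show keptW (w+1) T = keptW w (T.map List.tail) from by
            rw [keptW]; rw [if_pos hc]]
    · rw [if_neg (fun h => hc (hcol.mp h))]
      rw [← pref_shift P T hl hTne]
      rw [show (jn : Int) + ((w+1 : Nat) : Int) = ((jn+1 : Nat) : Int) + (w : Int) by push_cast; ring]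
      rw [show ((jn : Nat) : Int) + 1 = ((jn+1 : Nat) : Int) by push_cast; ring]
      rw [inner_char w (List.zipWith (fun p r => p ++ [r.headD 0]) P T) (T.map List.tail) (jn+1)
            (by simp [List.length_zipWith]; omega)
            (by
              intro q hq
              obtain ⟨a, ha, b, hb, rfl⟩ := mem_zipWith' _ P T q hq
              simp [hP a ha])
            htail]
      rw [pref_push]
      rw [show filtCols (w+1) T
            = List.zipWith (fun r rest => r.headD 0 :: rest) T (filtCols w (T.map List.tail)) from by
            rw [filtCols]; rw [if_neg hc]]
      rw [show keptW (w+1) T = keptW w (T.map List.tail) + 1 from by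
            rw [keptW]; rw [if_neg hc]]
      rw [show (((jn+1 : Nat) : Int)) + ((keptW w (T.map List.tail) : Nat) : Int)
            = (jn : Int) + (((keptW w (T.map List.tail) + 1 : Nat)) : Int) from by push_cast; ring]

theorem phase1 : ∀ (Z rest : List (List Int)) (k : Int), (∀ r ∈ Z, nulvectorL r = 1) →
    outerL (Z ++ rest) (((Z ++ rest).length : Nat) : Int) k 0 0
      = outerL rest ((rest.length : Nat) : Int) k 0 0
  | [], rest, k, _ => by simp
  | z :: Z, rest, k, hZ => by
    rw [List.cons_append, outerL, dif_pos (by simp only [List.length_cons]; omega)]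
    rw [PySem.List.pyGet?_zero_cons]
    simp only [Option.getD_some]
    rw [if_pos (hZ z (by simp)), PySem.List.pop?_zero_cons]
    rw [show ((z :: (Z ++ rest)).length : Int) - 1 = (((Z ++ rest).length : Nat) : Int) by
          simp only [List.length_cons]; push_cast; ring]
    exact phase1 Z rest k (fun r hr => hZ r (by simp [hr]))

theorem phase2 : ∀ (n : Nat) (res : List (List Int)) (inat : Nat) (k j : Int),
    1 ≤ inat → res.length ≤ inat + n →
    outerL res ((res.length : Nat) : Int) k ((inat : Nat) : Int) j
      = res.take inat ++ (res.drop inat).filter nzB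
  | 0, res, inat, k, j, h1, hn => by
    rw [outerL, dif_neg (by omega)]
    rw [List.take_of_length_le (by omega), List.drop_eq_nil_of_le (by omega)]
    simp
  | n+1, res, inat, k, j, h1, hn => by
    by_cases hlt : inat < res.length
    · rw [outerL, dif_pos (by omega)]
      rw [PySem.List.pyGet?_natCast, List.getElem?_eq_getElem hlt]
      simp only [Option.getD_some]
      by_cases hz : nulvectorL res[inat] = 1
      · rw [if_pos hz, PySem.List.pop?_natCast _ _ hlt]
        rw [show ((res.length : Nat) : Int) - 1 = (((res.eraseIdx inat).length : Nat) : Int) by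
              rw [List.length_eraseIdx]; rw [if_pos hlt]; omega]
        have hrec := phase2 n (res.eraseIdx inat) inat k j h1
          (by rw [List.length_eraseIdx, if_pos hlt]; omega)
        have hzrow : nzB res[inat] = false := (nulvector_eq_one_eq _).mp hz
        have hR : res.take inat ++ (res.drop inat).filter nzB
            = (res.eraseIdx inat).take inat ++ ((res.eraseIdx inat).drop inat).filter nzB := by
          rw [List.eraseIdx_eq_take_drop_succ]
          rw [List.take_left' (by rw [List.length_take]; omega),
              List.drop_left' (by rw [List.length_take]; omega)]
          rw [List.drop_eq_getElem_cons hlt, List.filter_cons, if_neg (by simp [hzrow])]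
        rw [hR]
        exact hrec
      · rw [if_neg hz, if_neg (by omega : ¬ ((inat : Nat) : Int) = 0)]
        rw [show ((inat : Nat) : Int) + 1 = (((inat+1 : Nat)) : Int) by push_cast; ring]
        rw [phase2 n res (inat+1) k j (by omega) (by omega)]
        have hnz : nzB res[inat] = true := by
          cases hb : nzB res[inat]
          · exact absurd ((nulvector_eq_one_eq _).mpr hb) hz
          · rfl
        rw [List.drop_eq_getElem_cons hlt, List.filter_cons, if_pos (by simp [hnz])]
        rw [List.take_add_one, List.getElem?_eq_getElem hlt]
        rw [Option.toList_some, List.append_assoc, List.singleton_append]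
    · rw [outerL, dif_neg (by omega)]
      rw [List.take_of_length_le (by omega), List.drop_eq_nil_of_le (by omega)]
      simp

theorem getD_zero_headD (r : List Int) : r.getD 0 0 = r.headD 0 := by cases r <;> rfl

theorem getD_succ_tail (r : List Int) (t : Nat) : r.getD (t+1) 0 = r.tail.getD t 0 := by
  cases r <;> rfl

theorem maskF_zero (T : List (List Int)) : maskF T 0 = !T.all (fun r => r.headD 0 == 0) := by
  unfold maskF
  induction T with
  | nil => rfl
  | cons a T ih =>
    rw [List.any_cons, List.all_cons, Bool.not_and, ← ih, getD_zero_headD]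
    rfl

theorem maskF_succ (T : List (List Int)) (t : Nat) : maskF T (t+1) = maskF (T.map List.tail) t := by
  unfold maskF
  rw [List.any_map]
  congr 1
  funext r
  show (r.getD (t+1) 0 != 0) = (r.tail.getD t 0 != 0)
  rw [getD_succ_tail]

theorem filtCols_eq_map : ∀ (w : Nat) (T : List (List Int)), (∀ r ∈ T, r.length = w) →
    filtCols w T = T.map (fun r => ((List.range w).filter (maskF T)).map (fun t => r.getD t 0))
  | 0, T, _ => by simp [filtCols]
  | w+1, T, hT => by
    have htail : ∀ r ∈ T.map List.tail, r.length = w := by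
      intro r hr
      obtain ⟨s, hs, rfl⟩ := List.mem_map.mp hr
      have := hT s hs
      simp [List.length_tail, this]
    rw [List.range_succ_eq_map, List.filter_cons]
    by_cases hc : T.all (fun r => r.headD 0 == 0) = true
    · rw [show filtCols (w+1) T = filtCols w (T.map List.tail) from by
            rw [filtCols]; rw [if_pos hc]]
      rw [filtCols_eq_map w _ htail]
      have h0 : maskF T 0 = false := by rw [maskF_zero, hc]; rfl
      rw [if_neg (by simp [h0])]
      rw [List.filter_map,
          show maskF T ∘ Nat.succ = maskF (T.map List.tail) from by
            funext t; exact maskF_succ T t]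
      rw [List.map_map]
      apply List.map_congr_left
      intro r _
      simp only [Function.comp_apply]
      rw [List.map_map]
      apply List.map_congr_left
      intro t _
      exact (getD_succ_tail r t).symm
    · have hcf : T.all (fun r => r.headD 0 == 0) = false := by
        cases hall : T.all (fun r => r.headD 0 == 0)
        · rfl
        · exact absurd hall hc
      rw [show filtCols (w+1) T
            = List.zipWith (fun r rest => r.headD 0 :: rest) T (filtCols w (T.map List.tail)) from by
            rw [filtCols]; rw [if_neg hc]]
      rw [filtCols_eq_map w _ htail]
      have h0 : maskF T 0 = true := by rw [maskF_zero, hcf]; rfl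
      rw [if_pos (by simp [h0])]
      rw [List.map_map, List.zipWith_map_right, List.zipWith_self]
      rw [List.filter_map,
          show maskF T ∘ Nat.succ = maskF (T.map List.tail) from by
            funext t; exact maskF_succ T t]
      apply List.map_congr_left
      intro r _
      simp only [Function.comp_apply, List.map_cons]
      congr 1
      · exact (getD_zero_headD r).symm
      · rw [List.map_map]
        apply List.map_congr_left
        intro t _
        exact (getD_succ_tail r t).symm

theorem getD_mem_or (r : List Int) (t : Nat) : r.getD t 0 = 0 ∨ r.getD t 0 ∈ r := by
  by_cases h : t < r.length
  · right; rw [List.getD_eq_getElem r 0 h]; exact List.getElem_mem h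
  · left; rw [List.getD_eq_getElem?_getD, List.getElem?_eq_none (by omega)]; rfl

theorem nzB_of_getD (r : List Int) (t : Nat) (h : (r.getD t 0 != 0) = true) : nzB r = true := by
  rcases getD_mem_or r t with h0 | hm
  · rw [h0] at h; simp at h
  · rw [nzB_eq_true_iff]; exact ⟨_, hm, by simpa using h⟩

theorem nz_row_ex (r : List Int) (h : nzB r = true) :
    ∃ t, t < r.length ∧ (r.getD t 0 != 0) = true := by
  obtain ⟨x, hx, hx0⟩ := (nzB_eq_true_iff r).mp h
  obtain ⟨n, hn, rfl⟩ := List.mem_iff_getElem.mp hx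
  exact ⟨n, hn, by rw [List.getD_eq_getElem r 0 hn]; simpa using hx0⟩

theorem nzB_sel (T : List (List Int)) (w : Nat) (r : List Int) (hmem : r ∈ T) (hr : r.length = w) :
    nzB (((List.range w).filter (maskF T)).map (fun t => r.getD t 0)) = nzB r := by
  cases hz : nzB r with
  | true =>
    obtain ⟨t, ht, htv⟩ := nz_row_ex r hz
    have hmask : maskF T t = true := by
      unfold maskF; rw [List.any_eq_true]; exact ⟨r, hmem, htv⟩
    rw [nzB_eq_true_iff]
    exact ⟨r.getD t 0,
      List.mem_map.mpr ⟨t, List.mem_filter.mpr ⟨List.mem_range.mpr (by omega), hmask⟩, rfl⟩,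
      by simpa using htv⟩
  | false =>
    rw [nzB_eq_false_iff]
    intro x hx
    obtain ⟨t, _, rfl⟩ := List.mem_map.mp hx
    rcases getD_mem_or r t with h0 | hm
    · exact h0
    · exact ((nzB_eq_false_iff r).mp hz) _ hm

theorem any_filter_imp (p q : List Int → Bool) : ∀ (T : List (List Int)),
    (∀ r ∈ T, q r = true → p r = true) → (T.filter p).any q = T.any q
  | [], _ => rfl
  | a :: T, h => by
    rw [List.filter_cons]
    by_cases hp : p a = true
    · simp only [if_pos hp, List.any_cons]
      rw [any_filter_imp p q T (fun r hr hq => h r (by simp [hr]) hq)]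
    · have hq : q a = false := by
        cases hqa : q a
        · rfl
        · exact absurd (h a (by simp) hqa) hp
      simp only [if_neg hp, List.any_cons, hq, Bool.false_or]
      exact any_filter_imp p q T (fun r hr hqr => h r (by simp [hr]) hqr)

theorem split_zeros : ∀ (m : List (List Int)),
    (∀ r ∈ m, ∀ x ∈ r, x = 0) ∨
    ∃ Z r0 rs, m = Z ++ r0 :: rs ∧ (∀ r ∈ Z, ∀ x ∈ r, x = 0) ∧ nzB r0 = true
  | [] => Or.inl (by simp)
  | a :: m => by
    cases ha : nzB a with
    | true => exact Or.inr ⟨[], a, m, by simp, by simp, ha⟩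
    | false =>
      have haz : ∀ x ∈ a, x = 0 := (nzB_eq_false_iff a).mp ha
      rcases split_zeros m with hall | ⟨Z, r0, rs, rfl, hZ, hr0⟩
      · exact Or.inl (by
          intro r hr
          rcases List.mem_cons.mp hr with rfl | hr
          · exact haz
          · exact hall r hr)
      · refine Or.inr ⟨a :: Z, r0, rs, by simp, ?_, hr0⟩
        intro r hr
        rcases List.mem_cons.mp hr with rfl | hr
        · exact haz
        · exact hZ r hr

-- B in canonical form
theorem alt_char (m : List (List Int)) (r0 : List Int) (X : List (List Int))
    (h : m.filter (fun r => r.any (fun x => x != 0)) = r0 :: X) :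
    delnul_alt m
      = (r0 :: X).map (fun r => ((List.range r0.length).filter (maskF (r0 :: X))).map
          (fun t => r.getD t 0)) := by
  simp only [delnul_alt]
  rw [h, if_neg (by simp)]
  rw [PySem.List.pyGet?_zero_cons]
  simp only [Option.getD_some]
  rw [PySem.List.pyRange_zero_nat, List.filter_map]
  have hpred : (((fun j => (r0 :: X).any fun r => (PySem.List.pyGet? r j).getD 0 != 0)) ∘
      (fun k : Nat => (k : Int))) = maskF (r0 :: X) := by
    funext t
    simp [maskF, Function.comp, PySem.List.pyGet?_natCast, List.getD_eq_getElem?_getD]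
  rw [hpred]
  apply List.map_congr_left
  intro r _
  rw [List.map_map]
  apply List.map_congr_left
  intro t _
  simp [Function.comp, PySem.List.pyGet?_natCast, List.getD_eq_getElem?_getD]

-- ===== VERDICT (the statements are the Claim_ definitions above) =====
theorem delnul_spec : Claim_equal_delnul := by
  unfold Claim_equal_delnul
  intro m _ hpre
  obtain ⟨hne, hcase⟩ := hpre
  unfold Spec_delnul delnul
  rcases split_zeros m with hall | ⟨Z, r0, rs, hm, hZ, hr0⟩
  · -- every row is zero: A pops them all, B filters them all
    have hZ1 : ∀ r ∈ m, nulvectorL r = 1 := fun r hr => (nulvector_iff r).mpr (hall r hr)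
    have h1 := phase1 m [] (((PySem.List.pyGet? m 0).getD []).length : Int) hZ1
    rw [List.append_nil] at h1
    rw [h1, outerL, dif_neg (by norm_num)]
    simp only [delnul_alt]
    rw [List.filter_eq_nil_iff.mpr (fun r hr => by
      simp only [Bool.not_eq_true]
      exact (nzB_eq_false_iff r).mpr (hall r hr))]
    rw [if_pos rfl]
  · -- m = Z ++ r0 :: rs with Z all-zero and r0 the first non-zero row
    have hr0m : r0 ∈ m := by rw [hm]; simp
    have hrect : ∀ r ∈ m, r.length = (m.headD []).length := by
      rcases hcase with hall' | h
      · exact absurd ((nzB_eq_false_iff r0).mpr (hall' r0 hr0m)) (by simp [hr0])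
      · exact h
    have hwm : ∀ r ∈ m, r.length = r0.length := by
      intro r hr; rw [hrect r hr, ← hrect r0 hr0m]
    have hk : (((PySem.List.pyGet? m 0).getD []).length : Int) = ((r0.length : Nat) : Int) := by
      cases m with
      | nil => exact absurd rfl hne
      | cons a m' =>
        rw [PySem.List.pyGet?_zero_cons]
        simp only [Option.getD_some]
        exact_mod_cast congrArg Nat.cast (hwm a (by simp))
    rw [hk]
    have hZ1 : ∀ r ∈ Z, nulvectorL r = 1 := fun r hr => (nulvector_iff r).mpr (hZ r hr)
    rw [hm, phase1 Z (r0 :: rs) ((r0.length : Nat) : Int) hZ1]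
    rw [outerL, dif_pos (by simp only [List.length_cons]; omega)]
    rw [PySem.List.pyGet?_zero_cons]
    simp only [Option.getD_some]
    have hnz1 : ¬ nulvectorL r0 = 1 := by rw [nulvector_eq_one_eq]; simp [hr0]
    rw [if_neg hnz1, if_pos trivial]
    have hT : ∀ r ∈ r0 :: rs, r.length = r0.length := by
      intro r hr
      exact hwm r (by rw [hm]; exact List.mem_append_right Z hr)
    have hI := inner_char r0.length ((r0 :: rs).map (fun _ => ([] : List Int))) (r0 :: rs) 0
      (by simp)
      (by intro p hp; obtain ⟨s, _, rfl⟩ := List.mem_map.mp hp; rfl)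
      hT
    rw [zipWith_nil_pref (r0 :: rs) (r0 :: rs) (le_refl _)] at hI
    rw [zipWith_nil_pref (r0 :: rs) (filtCols r0.length (r0 :: rs))
          (le_of_eq (length_filtCols _ _))] at hI
    simp only [Nat.cast_zero, zero_add] at hI
    rw [hI]
    show outerL (filtCols r0.length (r0 :: rs)) (((r0 :: rs).length : Nat) : Int)
        ((keptW r0.length (r0 :: rs) : Nat) : Int) (0 + 1) ((keptW r0.length (r0 :: rs) : Nat) : Int)
      = _
    rw [show (((r0 :: rs).length : Nat) : Int)
          = (((filtCols r0.length (r0 :: rs)).length : Nat) : Int) by rw [length_filtCols]]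
    rw [show ((0 : Int) + 1) = (((1 : Nat)) : Int) by norm_num]
    rw [phase2 (filtCols r0.length (r0 :: rs)).length (filtCols r0.length (r0 :: rs)) 1 _ _
          (by omega) (by omega)]
    rw [filtCols_eq_map r0.length (r0 :: rs) hT]
    simp only [List.map_cons, List.take_succ_cons, List.take_zero, List.drop_succ_cons,
      List.drop_zero, List.singleton_append]
    rw [List.filter_map]
    rw [show List.filter (nzB ∘ fun r => List.map (fun t => r.getD t 0)
          (List.filter (maskF (r0 :: rs)) (List.range r0.length))) rs
        = List.filter nzB rs from by
      apply List.filter_congr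
      intro r hr
      exact nzB_sel (r0 :: rs) r0.length r (by simp [hr]) (hT r (by simp [hr]))]
    -- B side
    have hfil : (Z ++ r0 :: rs).filter (fun r => r.any (fun x => x != 0))
        = r0 :: rs.filter nzB := by
      rw [show (fun r : List Int => r.any (fun x => x != 0)) = nzB from rfl]
      rw [List.filter_append, List.filter_eq_nil_iff.mpr (fun r hr => by
        simp only [Bool.not_eq_true]
        exact (nzB_eq_false_iff r).mpr (hZ r hr))]
      rw [List.nil_append, List.filter_cons, if_pos hr0]
    rw [alt_char _ _ _ hfil]
    have hmask : ∀ t : Nat, maskF (r0 :: List.filter nzB rs) t = maskF (r0 :: rs) t := by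
      intro t
      rw [show (r0 :: List.filter nzB rs) = (r0 :: rs).filter nzB from by
        rw [List.filter_cons, if_pos hr0]]
      unfold maskF
      exact any_filter_imp nzB _ (r0 :: rs) (fun r' _ hq => nzB_of_getD r' t hq)
    rw [show List.filter (maskF (r0 :: List.filter nzB rs)) (List.range r0.length)
          = List.filter (maskF (r0 :: rs)) (List.range r0.length) from
      List.filter_congr (fun t _ => hmask t)]
    rw [List.map_cons]
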